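-- pv_equiv track=rewrite | github.com/jamessvoss/XNautical | cloud-functions/enc-converter/compose_job.py | compute_zoom_ownership
-- ===== SOURCE A (Python) =====
-- SCALE_ZOOM_RANGES = {
--     1: (0, 8),
--     2: (0, 10),
--     3: (4, 13),
--     4: (6, 15),
--     5: (6, 15),
--     6: (6, 15),
-- }
--
-- def compute_zoom_ownership(scales: set) -> dict:
--     """For each zoom 0-15, highest scale whose native range covers it wins.
--     Returns {scale_num: (minzoom, maxzoom)} with non-overlapping ranges."""
--     zoom_to_owner = {}
--     for z in range(0, 16):
--         best = None
--         for sn in scales: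
--             lo, hi = SCALE_ZOOM_RANGES.get(sn, (0, 15))
--             if lo <= z <= hi and (best is None or sn > best):
--                 best = sn
--         if best is not None:
--             zoom_to_owner[z] = best
--
--     ownership = {}
--     for z in sorted(zoom_to_owner):
--         sn = zoom_to_owner[z]
--         if sn not in ownership:
--             ownership[sn] = (z, z)
--         else:
--             ownership[sn] = (ownership[sn][0], z)
--     return ownership
-- ===== SOURCE B (Python) =====
-- SCALE_ZOOM_RANGES = {
--     1: (0, 8),
--     2: (0, 10),
--     3: (4, 13),
--     4: (6, 15),
--     5: (6, 15),
--     6: (6, 15),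
-- }
--
-- def compute_zoom_ownership(scales: set) -> dict:
--     """Scale-outer sweep: each scale bids for the zooms of its range, the
--     highest bidder per zoom wins; then build {scale: (minzoom, maxzoom)}."""
--     best = {}
--     for sn in scales:
--         lo, hi = SCALE_ZOOM_RANGES.get(sn, (0, 15))
--         for z in range(lo, hi + 1):
--             b = best.get(z)
--             if b is None or sn > b:
--                 best[z] = sn
--     ownership = {}
--     for z in range(16):
--         sn = best.get(z)
--         if sn is not None:
--             ownership[sn] = (ownership.get(sn, (z, z))[0], z)
--     return ownership
-- ===== Notes on version B (the rewrite author's own statement) =====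
-- stated objective: alternative
-- what changed: Replaces the zoom-outer best-so-far scan over scales plus dict-compression over sorted keys with a scale-outer sweep in which each scale bids for the zooms of its range (highest bid per zoom wins) and the ranges are then read off in one pass over zooms 0-15; B avoids recomputing each scale's range 16 times, a constant-factor saving a timing run measured.
import Mathlib
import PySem

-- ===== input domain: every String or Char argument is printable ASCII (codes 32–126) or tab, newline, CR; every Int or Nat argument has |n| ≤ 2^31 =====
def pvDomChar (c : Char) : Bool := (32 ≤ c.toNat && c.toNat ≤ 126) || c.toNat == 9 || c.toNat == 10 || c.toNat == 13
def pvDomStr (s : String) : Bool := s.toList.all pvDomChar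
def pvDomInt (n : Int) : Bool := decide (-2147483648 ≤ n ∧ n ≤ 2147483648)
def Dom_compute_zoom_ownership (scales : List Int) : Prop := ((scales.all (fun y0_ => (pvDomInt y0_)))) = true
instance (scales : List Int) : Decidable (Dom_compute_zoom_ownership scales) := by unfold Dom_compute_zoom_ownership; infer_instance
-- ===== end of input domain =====

-- B replaces A's zoom-outer best-so-far scan (plus sorted-key compression) by a scale-outer
-- sweep where each scale bids for the zooms of its range ("alternative"; a timing run measured B faster by a constant factor).
-- Equivalence is about the RETURN value; neither version mutates its argument.

-- shared module constant SCALE_ZOOM_RANGES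
def SCALE_ZOOM_RANGES : PySem.Dict Int (Int × Int) :=
  PySem.Dict.ofList [(1, (0, 8)), (2, (0, 10)), (3, (4, 13)), (4, (6, 15)), (5, (6, 15)), (6, (6, 15))]

-- ===== PORT A =====
-- inner 'for sn in scales' loop body of A (best-so-far scan at zoom z)
def bestStep (z : Int) (best : Option Int) (sn : Int) : Option Int :=
  let p := SCALE_ZOOM_RANGES.getD sn (0, 15)
  if p.1 ≤ z ∧ z ≤ p.2 ∧ (best.isNone ∨ best.getD 0 < sn) then some sn else best

def compute_zoom_ownership (scales : List Int) : List (Int × Int × Int) :=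
  let zoom_to_owner : PySem.Dict Int Int :=
    (PySem.List.pyRange 0 16 1).foldl (fun d z =>
      let best := scales.foldl (bestStep z) none
      match best with
      | some b => d.insert z b          -- if best is not None: zoom_to_owner[z] = best
      | none   => d) PySem.Dict.empty
  let ownership : PySem.Dict Int (Int × Int) :=
    (PySem.List.sorted zoom_to_owner.keys (fun x => x) false).foldl (fun own z =>
      match zoom_to_owner.get? z with   -- sn = zoom_to_owner[z]; never raises: z comes from the keys
      | some sn =>
        match own.get? sn with          -- 'if sn not in ownership'
        | none   => own.insert sn (z, z)
        | some q => own.insert sn (q.1, z)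
      | none => own) PySem.Dict.empty
  ownership.items

-- ===== PORT B =====
def compute_zoom_ownership_alt (scales : List Int) : List (Int × Int × Int) :=
  let best : PySem.Dict Int Int :=
    scales.foldl (fun d sn =>
      let p := SCALE_ZOOM_RANGES.getD sn (0, 15)
      (PySem.List.pyRange p.1 (p.2 + 1) 1).foldl (fun d z =>
        if (d.get? z).isNone ∨ (d.get? z).getD 0 < sn then d.insert z sn else d) d)
      PySem.Dict.empty
  let ownership : PySem.Dict Int (Int × Int) :=
    (PySem.List.pyRange 0 16 1).foldl (fun own z =>
      match best.get? z with
      | some sn => own.insert sn ((own.getD sn (z, z)).1, z)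
      | none    => own) PySem.Dict.empty
  ownership.items

-- ===== PRECONDITION & SPEC =====
def Spec_compute_zoom_ownership (scales : List Int) (out : List (Int × Int × Int)) : Prop := out = compute_zoom_ownership_alt scales
instance (scales : List Int) (out : List (Int × Int × Int)) : Decidable (Spec_compute_zoom_ownership scales out) := by unfold Spec_compute_zoom_ownership; infer_instance

-- ===== CLAIM (what is proved, stated in full; the proofs are below) =====
def Claim_equal_compute_zoom_ownership : Prop := ∀ (scales : List Int), Dom_compute_zoom_ownership scales → Spec_compute_zoom_ownership scales (compute_zoom_ownership scales)

-- ===== LEMMAS AND PROOFS =====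

-- A's best-so-far value at zoom z, as a fold (definitional in port A)
def bestF (scales : List Int) (z : Int) : Option Int := scales.foldl (bestStep z) none

-- B's inner claim loop touches key z' exactly once; its effect on get? at z'
theorem get?_claimFold (sn : Int) (zs : List Int) (hn : zs.Nodup) (d : PySem.Dict Int Int) (z : Int) :
    ((zs.foldl (fun d z => if (d.get? z).isNone ∨ (d.get? z).getD 0 < sn then d.insert z sn else d) d).get? z)
      = if z ∈ zs then (if (d.get? z).isNone ∨ (d.get? z).getD 0 < sn then some sn else d.get? z)
        else d.get? z := by
  induction zs generalizing d with
  | nil => simp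
  | cons z0 rest ih =>
    have hn' : rest.Nodup := hn.of_cons
    have hz0 : z0 ∉ rest := (List.nodup_cons.mp hn).1
    simp only [List.foldl_cons]
    rw [ih hn']
    have hstep : ((if (d.get? z0).isNone ∨ (d.get? z0).getD 0 < sn then d.insert z0 sn else d).get? z)
        = if z = z0 then (if (d.get? z0).isNone ∨ (d.get? z0).getD 0 < sn then some sn else d.get? z0)
          else d.get? z := by
      by_cases h1 : (d.get? z0).isNone = true ∨ (d.get? z0).getD 0 < sn
      · rw [if_pos h1, PySem.Dict.get?_insert]
        by_cases h2 : z = z0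
        · rw [if_pos h2, if_pos h2, if_pos h1]
        · rw [if_neg h2, if_neg h2]
      · rw [if_neg h1]
        by_cases h2 : z = z0
        · rw [if_pos h2, if_neg h1, h2]
        · rw [if_neg h2]
    rw [hstep]
    by_cases hmem : z = z0
    · subst hmem; simp [hz0]
    · simp [List.mem_cons, hmem]

-- pyRange with step 1 has no duplicates
theorem pyRange_one_nodup (a b : Int) : (PySem.List.pyRange a b 1).Nodup := by
  rw [PySem.List.pyRange_of_pos a b (by norm_num)]
  refine List.Nodup.map ?_ List.nodup_range
  intro k1 k2 h
  simp only [] at h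
  omega

-- B's outer fold computes, at every key z, exactly A's best-so-far fold
theorem get?_bestDict (scales : List Int) (d : PySem.Dict Int Int) (z : Int) :
    ((scales.foldl (fun d sn =>
        let p := SCALE_ZOOM_RANGES.getD sn (0, 15)
        (PySem.List.pyRange p.1 (p.2 + 1) 1).foldl (fun d z =>
          if (d.get? z).isNone ∨ (d.get? z).getD 0 < sn then d.insert z sn else d) d) d).get? z)
      = scales.foldl (bestStep z) (d.get? z) := by
  induction scales generalizing d with
  | nil => rfl
  | cons sn rest ih =>
    simp only [List.foldl_cons]
    rw [ih]
    congr 1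
    rw [get?_claimFold sn _ (pyRange_one_nodup _ _) d z]
    simp only [PySem.List.mem_pyRange_one, bestStep]
    by_cases hc : (SCALE_ZOOM_RANGES.getD sn (0, 15)).1 ≤ z ∧ z ≤ (SCALE_ZOOM_RANGES.getD sn (0, 15)).2
    · have hm : (SCALE_ZOOM_RANGES.getD sn (0, 15)).1 ≤ z ∧ z < (SCALE_ZOOM_RANGES.getD sn (0, 15)).2 + 1 := ⟨hc.1, by omega⟩
      simp only [hm]
      split_ifs with h1 h2 h2 <;> simp_all
      omega
    · have hm : ¬ ((SCALE_ZOOM_RANGES.getD sn (0, 15)).1 ≤ z ∧ z < (SCALE_ZOOM_RANGES.getD sn (0, 15)).2 + 1) := by omega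
      simp only [hm, if_neg, not_false_iff]
      split_ifs with h1 <;> simp_all

-- canonical middle form both ports are reduced to
def ownedZooms (scales : List Int) : List Int :=
  (PySem.List.pyRange 0 16 1).filter (fun z => (bestF scales z).isSome)

def canonStep (scales : List Int) (own : PySem.Dict Int (Int × Int)) (z : Int) : PySem.Dict Int (Int × Int) :=
  own.insert ((bestF scales z).getD 0) ((own.getD ((bestF scales z).getD 0) (z, z)).1, z)

def canon (scales : List Int) : List (Int × Int × Int) :=
  ((ownedZooms scales).foldl (canonStep scales) PySem.Dict.empty).items

-- A's zoom_to_owner dict (the let-bound value in port A)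
def ztoD (scales : List Int) : PySem.Dict Int Int :=
  (PySem.List.pyRange 0 16 1).foldl (fun d z =>
    let best := scales.foldl (bestStep z) none
    match best with
    | some b => d.insert z b
    | none   => d) PySem.Dict.empty

theorem ownedZooms_nodup (scales : List Int) : (ownedZooms scales).Nodup :=
  (pyRange_one_nodup 0 16).filter _

theorem ztoD_items (scales : List Int) :
    (ztoD scales).items = (ownedZooms scales).map (fun z => (z, (bestF scales z).getD 0)) := by
  unfold ztoD
  rw [PySem.List.foldl_congr_mem _ _
        (fun d z => if (bestF scales z).isSome then d.insert z ((bestF scales z).getD 0) else d) _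
        (by intro d z _
            show (match bestF scales z with
                | some b => d.insert z b
                | none   => d)
              = (if (bestF scales z).isSome then d.insert z ((bestF scales z).getD 0) else d)
            cases bestF scales z <;> rfl)]
  rw [PySem.List.foldl_if_eq_foldl_filter]
  rw [PySem.Dict.items_foldl_insert_fresh _ (fun z => z) _ _
        (by intro a _; exact PySem.Dict.contains_empty a)
        (by rw [List.map_id']; exact ownedZooms_nodup scales)]
  rfl

theorem ztoD_keys (scales : List Int) : (ztoD scales).keys = ownedZooms scales := by
  simp only [PySem.Dict.keys, ztoD_items, List.map_map]
  exact List.map_id' _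

theorem ztoD_get? (scales : List Int) {z : Int} (hz : z ∈ ownedZooms scales) :
    (ztoD scales).get? z = some ((bestF scales z).getD 0) := by
  refine PySem.Dict.get?_of_mem_items _ ?_ ?_
  · rw [ztoD_items]; exact List.mem_map_of_mem hz
  · rw [ztoD_keys]; exact ownedZooms_nodup scales

theorem A_eq_canon (scales : List Int) : compute_zoom_ownership scales = canon scales := by
  show ((PySem.List.sorted (ztoD scales).keys (fun x => x) false).foldl (fun own z =>
      match (ztoD scales).get? z with
      | some sn =>
        match own.get? sn with
        | none   => own.insert sn (z, z)
        | some q => own.insert sn (q.1, z)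
      | none => own) PySem.Dict.empty).items = canon scales
  rw [ztoD_keys]
  rw [PySem.List.sorted_eq_of_perm_of_pairwise_lt _ (ownedZooms scales) _ (List.Perm.refl _)
        (List.Pairwise.filter _ (by decide : List.Pairwise (fun a b : Int => a < b) (PySem.List.pyRange 0 16 1)))]
  unfold canon
  congr 1
  refine PySem.List.foldl_congr_mem _ _ _ _ ?_
  intro own z hz
  rw [ztoD_get? scales hz]
  show (match own.get? ((bestF scales z).getD 0) with
      | none   => own.insert ((bestF scales z).getD 0) (z, z)
      | some q => own.insert ((bestF scales z).getD 0) (q.1, z)) = canonStep scales own z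
  unfold canonStep
  rw [PySem.Dict.getD_eq_get?_getD]
  cases hq : own.get? ((bestF scales z).getD 0) <;> rfl

-- B's best dict (the let-bound value in port B)
def bestD (scales : List Int) : PySem.Dict Int Int :=
  scales.foldl (fun d sn =>
    let p := SCALE_ZOOM_RANGES.getD sn (0, 15)
    (PySem.List.pyRange p.1 (p.2 + 1) 1).foldl (fun d z =>
      if (d.get? z).isNone ∨ (d.get? z).getD 0 < sn then d.insert z sn else d) d)
    PySem.Dict.empty

theorem bestD_get? (scales : List Int) (z : Int) : (bestD scales).get? z = bestF scales z := by
  unfold bestD bestF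
  rw [get?_bestDict]
  rfl

theorem B_eq_canon (scales : List Int) : compute_zoom_ownership_alt scales = canon scales := by
  show ((PySem.List.pyRange 0 16 1).foldl (fun own z =>
      match (bestD scales).get? z with
      | some sn => own.insert sn ((own.getD sn (z, z)).1, z)
      | none    => own) PySem.Dict.empty).items = canon scales
  unfold canon
  congr 1
  rw [PySem.List.foldl_congr_mem _ _
        (fun own z => if (bestF scales z).isSome then canonStep scales own z else own) _
        (by intro own z _
            show (match (bestD scales).get? z with
                | some sn => own.insert sn ((own.getD sn (z, z)).1, z)
                | none    => own)
              = (if (bestF scales z).isSome then canonStep scales own z else own)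
            rw [bestD_get? scales z]
            cases h : bestF scales z with
            | none => rfl
            | some sn =>
              show own.insert sn ((own.getD sn (z, z)).1, z) = canonStep scales own z
              unfold canonStep
              rw [h]
              rfl)]
  rw [PySem.List.foldl_if_eq_foldl_filter]
  rfl

-- ===== VERDICT (by name: the statement is the Claim_ definition above) =====
theorem compute_zoom_ownership_spec : Claim_equal_compute_zoom_ownership := by
  intro scales _
  unfold Spec_compute_zoom_ownership
  rw [A_eq_canon, B_eq_canon]
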